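-- pv_equiv track=rewrite | github.com/super30admin/Greedy-4 | getMinimumRotations.py | getMinimumRotations
-- ===== SOURCE A (Python) =====
-- def getMinimumRotations(A, B, num):
--     aRotation, bRotation = 0, 0
--
--     for i in range(len(A)):
--         if A[i] != num and B[i] != num:
--             return -1
--         elif A[i] != num:
--             aRotation += 1
--         elif B[i] != num:
--             bRotation += 1
--
--     return min(aRotation, bRotation)
-- ===== SOURCE B (Python) =====
-- def getMinimumRotations(A, B, num):
--     # feasibility scan first, then two independent counting passes
--     for i in range(len(A)):
--         if A[i] != num and B[i] != num:
--             return -1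
--     aRotation = sum(1 for i in range(len(A)) if A[i] != num)
--     bRotation = sum(1 for i in range(len(A)) if B[i] != num)
--     return min(aRotation, bRotation)
-- ===== Notes on version B (the rewrite author's own statement) =====
-- stated objective: simpler
-- what changed: Replaces A's single combined-branching loop with accumulators by a feasibility scan followed by two independent counting passes (count of A[i]!=num, count of B[i]!=num), equal because after the feasibility check B[i]!=num implies A[i]==num.
import Mathlib
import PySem

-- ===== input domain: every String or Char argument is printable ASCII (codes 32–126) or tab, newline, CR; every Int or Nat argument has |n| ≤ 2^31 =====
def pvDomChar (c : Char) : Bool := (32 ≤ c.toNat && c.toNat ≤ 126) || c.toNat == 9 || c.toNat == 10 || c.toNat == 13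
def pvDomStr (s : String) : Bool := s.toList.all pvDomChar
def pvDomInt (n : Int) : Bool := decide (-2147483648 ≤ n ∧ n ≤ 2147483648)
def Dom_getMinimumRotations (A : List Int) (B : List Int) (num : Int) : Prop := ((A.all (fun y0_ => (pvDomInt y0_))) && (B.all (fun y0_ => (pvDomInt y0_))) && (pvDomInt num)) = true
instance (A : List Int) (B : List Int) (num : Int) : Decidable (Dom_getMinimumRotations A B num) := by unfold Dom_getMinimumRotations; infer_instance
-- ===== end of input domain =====

-- B simplifies A's single combined-branching loop into a feasibility scan plus two
-- independent counting passes; return value only, no mutation, same O(n) cost.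

-- ===== PORT A =====
-- loop over the indices of range(len(A)), carrying the accumulators aRotation, bRotation;
-- A[i] / B[i] via pyGet? (the default 0 is only reached where Python raises IndexError, outside Pre_)
def goA (A B : List Int) (num : Int) : List Int → Int → Int → Int
  | [], aRot, bRot => min aRot bRot
  | i :: rest, aRot, bRot =>
    let ai := (PySem.List.pyGet? A i).getD 0
    let bi := (PySem.List.pyGet? B i).getD 0
    if ai ≠ num ∧ bi ≠ num then -1
    else if ai ≠ num then goA A B num rest (aRot + 1) bRot
    else if bi ≠ num then goA A B num rest aRot (bRot + 1)
    else goA A B num rest aRot bRot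

def getMinimumRotations (A : List Int) (B : List Int) (num : Int) : Int :=
  goA A B num (PySem.List.pyRange 0 A.length 1) 0 0

-- ===== PORT B =====
-- feasibility scan over the same index range
def altFeas (A B : List Int) (num : Int) : List Int → Bool
  | [] => false
  | i :: rest =>
    if (PySem.List.pyGet? A i).getD 0 ≠ num ∧ (PySem.List.pyGet? B i).getD 0 ≠ num then true
    else altFeas A B num rest

-- sum(1 for i in range(len(A)) if xs[i] != num)
def altCount (xs : List Int) (num : Int) : List Int → Int
  | [] => 0
  | i :: rest => (if (PySem.List.pyGet? xs i).getD 0 ≠ num then 1 else 0) + altCount xs num rest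

def getMinimumRotations_alt (A : List Int) (B : List Int) (num : Int) : Int :=
  let idx := PySem.List.pyRange 0 A.length 1
  if altFeas A B num idx then -1
  else min (altCount A num idx) (altCount B num idx)

-- ===== PRECONDITION & SPEC =====
-- Pre_ excludes exactly the inputs where Python A raises IndexError: B shorter than A and
-- no feasibility failure (A[i]!=num and B[i]!=num) occurring at an index inside B.
def Pre_getMinimumRotations (A : List Int) (B : List Int) (num : Int) : Prop :=
  A.length ≤ B.length ∨ ∃ p ∈ A.zip B, p.1 ≠ num ∧ p.2 ≠ num
instance (A : List Int) (B : List Int) (num : Int) : Decidable (Pre_getMinimumRotations A B num) := by unfold Pre_getMinimumRotations; infer_instance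

def pvWitness_getMinimumRotations : List Int × List Int × Int := ([1, 2], [2, 1], 2)

def Spec_getMinimumRotations (A : List Int) (B : List Int) (num : Int) (out : Int) : Prop := out = getMinimumRotations_alt A B num
instance (A : List Int) (B : List Int) (num : Int) (out : Int) : Decidable (Spec_getMinimumRotations A B num out) := by unfold Spec_getMinimumRotations; infer_instance

-- ===== CLAIM (what is proved, stated in full; the proofs are below) =====
def Claim_equal_getMinimumRotations : Prop := ∀ (A : List Int) (B : List Int) (num : Int), Dom_getMinimumRotations A B num → Pre_getMinimumRotations A B num → Spec_getMinimumRotations A B num (getMinimumRotations A B num)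

-- ===== LEMMAS AND PROOFS =====

-- main invariant: on any index list, A's fused loop equals feasibility-then-two-counts
theorem goA_eq (A B : List Int) (num : Int) (L : List Int) :
    ∀ aRot bRot : Int,
      goA A B num L aRot bRot =
        if altFeas A B num L then -1
        else min (aRot + altCount A num L) (bRot + altCount B num L) := by
  induction L with
  | nil => intro a b; simp [goA, altFeas, altCount]
  | cons i rest ih =>
    intro a b
    simp only [goA, altFeas, altCount]
    by_cases h1 : (PySem.List.pyGet? A i).getD 0 ≠ num ∧ (PySem.List.pyGet? B i).getD 0 ≠ num
    · simp [h1]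
    · simp only [h1, if_false]
      by_cases ha : (PySem.List.pyGet? A i).getD 0 ≠ num
      · have hb : ¬ (PySem.List.pyGet? B i).getD 0 ≠ num := fun hb => h1 ⟨ha, hb⟩
        simp [ha, hb, ih]
        ring_nf
      · by_cases hb : (PySem.List.pyGet? B i).getD 0 ≠ num
        · simp [ha, hb, ih]
          ring_nf
        · simp [ha, hb, ih]

-- ===== VERDICT (by name: the statement is the Claim_ definition above) =====
theorem getMinimumRotations_spec : Claim_equal_getMinimumRotations := by
  intro A B num _ _
  unfold Spec_getMinimumRotations getMinimumRotations getMinimumRotations_alt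
  rw [goA_eq]
  simp
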